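-- pv_equiv track=rewrite | github.com/MrBrantCode/unitest_baseline | mut_generate/mist_train_cf/cf_70957/solution.py | convertMinHeap
-- ===== SOURCE A (Python) =====
-- def isMinHeap(arr, i, n):
--     if 2 * i + 1 < n:
--         if arr[i] > arr[2 * i + 1]:
--             return False
--     if 2 * i + 2 < n:
--         if arr[i] > arr[2 * i + 2]:
--             return False
--     return True
--
-- def heapify(arr, i, num_swaps):
--     smallest = i
--     left = 2 * i + 1
--     right = 2 * i + 2
--
--     if left < len(arr) and arr[i] > arr[left]:
--         smallest = left
--
--     if right < len(arr) and arr[smallest] < arr[right]: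
--         smallest = right
--
--     if smallest != i:
--         arr[i], arr[smallest] = arr[smallest], arr[i]
--         num_swaps += 1
--         num_swaps = heapify(arr, smallest, num_swaps)
--
--     return num_swaps
--
-- def convertMinHeap(arr):
--     if not isMinHeap(arr, 0, len(arr)):
--         num_swaps = 0
--         for i in range((len(arr)-1)//2, -1, -1):
--             num_swaps = heapify(arr, i, num_swaps)
--         return num_swaps
--     else:
--         return 0
-- ===== SOURCE B (Python) =====
-- def convertMinHeap(arr):
--     # Return-value equivalent to A; performs the same in-place mutation of arr.
--     n = len(arr)
--     root_ok = not (1 < n and arr[0] > arr[1]) and not (2 < n and arr[0] > arr[2])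
--     if root_ok:
--         return 0
--     total = 0
--     for start in reversed(range((n - 1) // 2 + 1)):
--         node = start
--         while True:
--             left, right = 2 * node + 1, 2 * node + 2
--             smallest = node
--             if left < n and arr[node] > arr[left]:
--                 smallest = left
--             if right < n and arr[smallest] < arr[right]:
--                 smallest = right
--             if smallest == node:
--                 break
--             arr[node], arr[smallest] = arr[smallest], arr[node]
--             total += 1
--             node = smallest
--     return total
-- ===== Notes on version B (the rewrite author's own statement) =====
-- stated objective: alternative
-- what changed: Recursive heapify threading the swap accumulator through its recursion is replaced by an iterative while-loop sift-down with a local counter, the isMinHeap helper by one inline boolean root check, and the descending index for-loop by a reversed-range loop summing per-node swap counts.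
import Mathlib
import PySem

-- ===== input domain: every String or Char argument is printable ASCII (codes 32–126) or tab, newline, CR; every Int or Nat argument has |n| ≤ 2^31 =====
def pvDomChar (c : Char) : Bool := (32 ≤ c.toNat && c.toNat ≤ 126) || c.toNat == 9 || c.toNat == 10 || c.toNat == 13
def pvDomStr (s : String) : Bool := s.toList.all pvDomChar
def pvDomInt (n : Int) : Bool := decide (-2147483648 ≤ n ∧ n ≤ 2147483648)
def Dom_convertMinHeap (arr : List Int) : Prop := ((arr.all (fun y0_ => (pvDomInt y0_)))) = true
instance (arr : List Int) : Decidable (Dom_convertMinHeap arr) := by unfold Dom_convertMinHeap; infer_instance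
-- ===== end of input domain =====

-- B replaces A's accumulator-threading recursive heapify by an iterative sift-down with a local
-- counter (objective: alternative decomposition, same cost). Both Pythons mutate arr identically
-- in place; the equivalence proved here is about the return value.

-- ===== PORT A =====
-- early-return chain of isMinHeap, as nested conditions in the same order
def isMinHeapA (arr : List Int) (i : Nat) (n : Nat) : Bool :=
  if 2 * i + 1 < n ∧ arr.getD i 0 > arr.getD (2 * i + 1) 0 then false
  else if 2 * i + 2 < n ∧ arr.getD i 0 > arr.getD (2 * i + 2) 0 then false
  else true

-- A's recursive heapify; indices are the nonnegative list positions A uses, so Nat;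
-- every arr[...] read is guarded by its bound check exactly as in A, so getD is exact.
-- The fuel argument only makes the recursion structural (each recursive call strictly
-- increases i while keeping it < arr.length, so fuel = arr.length is never exhausted).
def heapifyAGo : Nat → List Int → Nat → Int → List Int × Int
  | 0, arr, _, num_swaps => (arr, num_swaps)
  | fuel + 1, arr, i, num_swaps =>
    let left := 2 * i + 1
    let right := 2 * i + 2
    let s1 := if left < arr.length ∧ arr.getD i 0 > arr.getD left 0 then left else i
    let s2 := if right < arr.length ∧ arr.getD s1 0 < arr.getD right 0 then right else s1
    if s2 ≠ i then
      heapifyAGo fuel ((arr.set i (arr.getD s2 0)).set s2 (arr.getD i 0)) s2 (num_swaps + 1)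
    else (arr, num_swaps)

def heapifyA (arr : List Int) (i : Nat) (num_swaps : Int) : List Int × Int :=
  heapifyAGo arr.length arr i num_swaps

-- range((len(arr)-1)//2, -1, -1) over the reached inputs (the branch is only evaluated when
-- isMinHeap is false, hence len(arr) ≥ 2): the Nat list [(n-1)/2, …, 0]
def convertMinHeap (arr : List Int) : Int :=
  if ¬ isMinHeapA arr 0 arr.length then
    (((List.range ((arr.length - 1) / 2 + 1)).reverse).foldl
        (fun st i => heapifyA st.1 i st.2) (arr, 0)).2
  else 0

-- ===== PORT B =====
-- one step of the while loop: the child to swap with, if any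
def siftStepB (arr : List Int) (node : Nat) : Option Nat :=
  let left := 2 * node + 1
  let right := 2 * node + 2
  let s1 := if left < arr.length ∧ arr.getD node 0 > arr.getD left 0 then left else node
  let s2 := if right < arr.length ∧ arr.getD s1 0 < arr.getD right 0 then right else s1
  if s2 = node then none else some s2

-- the while-true loop: returns the array after sifting plus the number of swaps done here;
-- fuel makes the loop structural (node strictly increases below arr.length, so arr.length
-- iterations always suffice)
def siftGoB : Nat → List Int → Nat → List Int × Int
  | 0, arr, _ => (arr, 0)
  | fuel + 1, arr, node =>
    match siftStepB arr node with
    | none => (arr, 0)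
    | some s =>
        let p := siftGoB fuel ((arr.set node (arr.getD s 0)).set s (arr.getD node 0)) s
        (p.1, p.2 + 1)

def siftDownB (arr : List Int) (node : Nat) : List Int × Int :=
  siftGoB arr.length arr node

def convertMinHeap_alt (arr : List Int) : Int :=
  let n := arr.length
  if ¬ (1 < n ∧ arr.getD 0 0 > arr.getD 1 0) ∧ ¬ (2 < n ∧ arr.getD 0 0 > arr.getD 2 0) then 0
  else
    ((List.range ((n - 1) / 2 + 1)).foldr
        (fun start st => let p := siftDownB st.1 start; (p.1, st.2 + p.2)) (arr, 0)).2

-- ===== PRECONDITION & SPEC =====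
def Spec_convertMinHeap (arr : List Int) (out : Int) : Prop := out = convertMinHeap_alt arr
instance (arr : List Int) (out : Int) : Decidable (Spec_convertMinHeap arr out) := by unfold Spec_convertMinHeap; infer_instance

-- ===== CLAIM (what is proved, stated in full; the proofs are below) =====
def Claim_equal_convertMinHeap : Prop := ∀ (arr : List Int), Dom_convertMinHeap arr → Spec_convertMinHeap arr (convertMinHeap arr)

-- ===== LEMMAS AND PROOFS =====

-- A's recursive heapify equals B's sift-down with the accumulator added afterwards
theorem heapifyGo_eq_siftGo (fuel : Nat) (arr : List Int) (i : Nat) (ns : Int) :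
    heapifyAGo fuel arr i ns = ((siftGoB fuel arr i).1, ns + (siftGoB fuel arr i).2) := by
  induction fuel generalizing arr i ns with
  | zero => simp [heapifyAGo, siftGoB]
  | succ fuel ih =>
    simp only [heapifyAGo, siftGoB, siftStepB]
    split_ifs <;> simp_all [ih] <;> ring

theorem heapify_eq_sift (arr : List Int) (i : Nat) (ns : Int) :
    heapifyA arr i ns = ((siftDownB arr i).1, ns + (siftDownB arr i).2) := by
  unfold heapifyA siftDownB
  exact heapifyGo_eq_siftGo arr.length arr i ns

-- A's foldl over the reversed range equals B's foldr with summed counts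
theorem fold_eq (l : List Nat) (arr : List Int) (ns : Int) :
    l.reverse.foldl (fun st i => heapifyA st.1 i st.2) (arr, ns)
      = ((l.foldr (fun start st => let p := siftDownB st.1 start; (p.1, st.2 + p.2)) (arr, 0)).1,
         ns + (l.foldr (fun start st => let p := siftDownB st.1 start; (p.1, st.2 + p.2)) (arr, 0)).2) := by
  induction l with
  | nil => simp
  | cons i t ih =>
    simp only [List.reverse_cons, List.foldl_append, List.foldl_cons, List.foldl_nil,
      List.foldr_cons]
    rw [ih, heapify_eq_sift]
    exact Prod.ext rfl (by ring)

-- the two root-guards agree, and in the non-heap branch the folds agree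
theorem main_eq (arr : List Int) : convertMinHeap arr = convertMinHeap_alt arr := by
  by_cases hc : (¬(1 < arr.length ∧ arr.getD 0 0 > arr.getD 1 0)
      ∧ ¬(2 < arr.length ∧ arr.getD 0 0 > arr.getD 2 0))
  · have hA : isMinHeapA arr 0 arr.length = true := by
      unfold isMinHeapA
      rw [if_neg (by simpa using hc.1), if_neg (by simpa using hc.2)]
    simp only [convertMinHeap, convertMinHeap_alt, hA]
    rw [if_neg (by simp), if_pos hc]
  · have hA : isMinHeapA arr 0 arr.length = false := by
      unfold isMinHeapA
      rcases not_and_or.mp hc with h | h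
      · rw [if_pos (by simpa using not_not.mp h)]
      · by_cases h1 : 1 < arr.length ∧ arr.getD 0 0 > arr.getD 1 0
        · rw [if_pos (by simpa using h1)]
        · rw [if_neg (by simpa using h1), if_pos (by simpa using not_not.mp h)]
    simp only [convertMinHeap, convertMinHeap_alt, hA]
    rw [if_pos (by simp), if_neg hc, fold_eq]
    simp

-- ===== VERDICT (by name: the statement is the Claim_ definition above) =====
theorem convertMinHeap_spec : Claim_equal_convertMinHeap := by
  intro arr _
  unfold Spec_convertMinHeap
  exact main_eq arr
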